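-- pv_equiv track=rewrite | github.com/tass25/planning | backend/partition/translation/dummy_data_generator.py | _gen_by_col
-- ===== SOURCE A (Python) =====
-- _GROUP_LABELS = ["NORTH", "SOUTH", "EAST", "WEST", "CENTRAL"]
--
-- def _gen_by_col(n: int, n_groups: int, col_name: str) -> list:
--     """BY-group column: exactly n_groups groups, sorted, ≥_ROWS_PER_GROUP rows each."""
--     labels = _GROUP_LABELS[:n_groups]
--     per_group = n // n_groups
--     col = []
--     for label in labels:
--         col.extend([label] * per_group)
--     # pad remainder
--     while len(col) < n:
--         col.append(labels[-1])
--     return col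
-- ===== SOURCE B (Python) =====
-- _GROUP_LABELS = ["NORTH", "SOUTH", "EAST", "WEST", "CENTRAL"]
--
-- def _gen_by_col(n: int, n_groups: int, col_name: str) -> list:
--     """BY-group column built in one position-indexed pass (no extend/pad loops)."""
--     labels = _GROUP_LABELS[:n_groups]
--     per_group = n // n_groups
--     if per_group <= 0:
--         # fewer rows than groups: every row carries the last label
--         return [labels[-1]] * max(n, 0)
--     last = len(labels) - 1
--     return [labels[min(i // per_group, last)] for i in range(n)]
-- ===== Notes on version B (the rewrite author's own statement) =====
-- stated objective: alternative
-- what changed: Replaces A's group-major extend loop plus remainder-padding while-loop by a single position-indexed pass: one comprehension over range(n) computing each row's label as labels[min(i // per_group, len(labels)-1)], with the n < n_groups case (per_group == 0) handled up front as a single replicate of the last label.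
-- outside the precondition, e.g. on _gen_by_col(-4, -3, 'x'): A returns ['NORTH', 'SOUTH'], B returns []; on _gen_by_col(0, -5, 'x'): A returns [], B raises IndexError; on _gen_by_col(5, 0, 'x'): A raises ZeroDivisionError, B raises ZeroDivisionError
import Mathlib
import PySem

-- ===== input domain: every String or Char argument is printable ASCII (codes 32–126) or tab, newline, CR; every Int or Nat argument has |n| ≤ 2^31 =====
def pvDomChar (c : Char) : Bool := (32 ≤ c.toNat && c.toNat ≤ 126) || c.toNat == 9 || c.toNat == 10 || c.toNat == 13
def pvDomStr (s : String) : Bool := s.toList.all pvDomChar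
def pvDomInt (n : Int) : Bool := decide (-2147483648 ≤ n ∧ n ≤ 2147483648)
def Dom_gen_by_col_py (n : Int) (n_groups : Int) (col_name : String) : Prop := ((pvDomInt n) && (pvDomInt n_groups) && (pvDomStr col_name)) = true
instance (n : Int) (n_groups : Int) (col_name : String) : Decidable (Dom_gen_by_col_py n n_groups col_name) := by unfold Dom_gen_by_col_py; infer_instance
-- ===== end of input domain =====

-- B replaces A's group-major extend loop + padding while-loop by a single position-indexed
-- pass (labels[min(i // per_group, last)] for each row), with the per_group == 0 case as one
-- replicate of the last label; objective: alternative (same O(n) cost, different decomposition).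

-- ===== PORT A =====
def pvGroupLabels : List String := ["NORTH", "SOUTH", "EAST", "WEST", "CENTRAL"]

-- 'while len(col) < n: col.append(last)'  (last = labels[-1], already looked up)
def pvPad (n : Int) (last : String) (col : List String) : List String :=
  if (col.length : Int) < n then pvPad n last (col ++ [last]) else col
termination_by (n - col.length).toNat
decreasing_by simp only [List.length_append, List.length_cons, List.length_nil]; omega

def gen_by_col_py (n : Int) (n_groups : Int) (col_name : String) : List String :=
  let labels := PySem.List.slice pvGroupLabels none (some n_groups)
  let per_group := PySem.Int.floordiv n n_groups  -- n_groups = 0: Python raises ZeroDivisionError (outside Pre_)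
  let col := labels.foldl (fun col label => col ++ List.replicate per_group.toNat label) []
  match PySem.List.pyGet? labels (-1) with
  | some last => pvPad n last col
  | none => col  -- labels == []: if the pad loop runs, Python raises IndexError (outside Pre_)

-- ===== PORT B =====
def gen_by_col_py_alt (n : Int) (n_groups : Int) (col_name : String) : List String :=
  let labels := PySem.List.slice pvGroupLabels none (some n_groups)
  let per_group := PySem.Int.floordiv n n_groups  -- n_groups = 0: Python raises ZeroDivisionError (outside Pre_)
  if per_group ≤ 0 then
    match PySem.List.pyGet? labels (-1) with
    | some last => List.replicate (max n 0).toNat last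
    | none => []  -- labels == []: Python raises IndexError (outside Pre_)
  else
    let last : Int := (labels.length : Int) - 1
    (PySem.List.pyRange 0 n 1).map (fun i =>
      (PySem.List.pyGet? labels (min (PySem.Int.floordiv i per_group) last)).getD "")

-- ===== PRECONDITION & SPEC =====
-- Pre_ restricts to the function's natural domain n_groups ≥ 1: n_groups = 0 raises
-- ZeroDivisionError, and negative n_groups only exercises accidental negative-slice /
-- floor-division behaviour of A (and raises IndexError when the slice is empty and n > 0).
def Pre_gen_by_col_py (n : Int) (n_groups : Int) (col_name : String) : Prop := 1 ≤ n_groups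
instance (n : Int) (n_groups : Int) (col_name : String) : Decidable (Pre_gen_by_col_py n n_groups col_name) := by unfold Pre_gen_by_col_py; infer_instance

def pvWitness_gen_by_col_py : Int × Int × String := (7, 3, "BY")

def Spec_gen_by_col_py (n : Int) (n_groups : Int) (col_name : String) (out : List String) : Prop := out = gen_by_col_py_alt n n_groups col_name
instance (n : Int) (n_groups : Int) (col_name : String) (out : List String) : Decidable (Spec_gen_by_col_py n n_groups col_name out) := by unfold Spec_gen_by_col_py; infer_instance

-- ===== CLAIM (what is proved, stated in full; the proofs are below) =====
def Claim_equal_gen_by_col_py : Prop := ∀ (n : Int) (n_groups : Int) (col_name : String), Dom_gen_by_col_py n n_groups col_name → Pre_gen_by_col_py n n_groups col_name → Spec_gen_by_col_py n n_groups col_name (gen_by_col_py n n_groups col_name)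

-- ===== LEMMAS AND PROOFS =====

-- pad loop closed form
theorem pvPad_eq (n : Int) (last : String) (col : List String) :
    pvPad n last col = col ++ List.replicate (n - col.length).toNat last := by
  fun_induction pvPad n last col with
  | case1 col h ih =>
    rw [ih]
    have h1 : (n - ((col ++ [last]).length : Int)).toNat + 1 = (n - (col.length : Int)).toNat := by
      simp only [List.length_append, List.length_cons, List.length_nil]; omega
    rw [List.append_assoc]
    congr 1
    rw [← h1, List.singleton_append, ← List.replicate_succ]
  | case2 col h =>
    have h0 : (n - (col.length : Int)).toNat = 0 := by omega
    simp [h0]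

-- flatMap of constant-size blocks, as a position-indexed map
theorem flatMap_replicate_eq (L : List String) (p : Nat) :
    L.flatMap (fun l => List.replicate p l)
      = (List.range (L.length * p)).map (fun i => L.getD (i / p) "") := by
  induction L with
  | nil => simp
  | cons a t ih =>
    have hr : (a :: t).length * p = p + t.length * p := by
      simp [List.length_cons]; ring
    rw [List.flatMap_cons, hr, List.range_add, List.map_append, ih]
    congr 1
    · symm
      apply List.eq_replicate_iff.mpr
      constructor
      · simp
      · intro b hb
        simp only [List.mem_map, List.mem_range] at hb
        obtain ⟨i, hi, rfl⟩ := hb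
        rw [Nat.div_eq_of_lt hi]
        rfl
    · rw [List.map_map]
      apply List.map_congr_left
      intro j hj
      by_cases hp : p = 0
      · simp [hp] at hj
      have hpj : (p + j) / p = j / p + 1 := by
        rw [Nat.add_comm, Nat.add_div_right _ (Nat.pos_of_ne_zero hp)]
      simp [Function.comp, hpj]

-- merging the padded flatMap into one position-indexed map
theorem pv_key (L : List String) (hL : L ≠ []) (p N : Nat) (hp : 1 ≤ p)
    (hN : L.length * p ≤ N) :
    (List.range (L.length * p)).map (fun i => L.getD (i / p) "")
        ++ List.replicate (N - L.length * p) (L.getLast hL)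
      = (List.range N).map (fun k => L.getD (min (k / p) (L.length - 1)) "") := by
  have hm : 1 ≤ L.length := List.length_pos_iff.mpr hL
  rw [show N = L.length * p + (N - L.length * p) by omega, List.range_add, List.map_append]
  congr 1
  · apply List.map_congr_left
    intro i hi
    rw [List.mem_range] at hi
    have hdiv : i / p < L.length := Nat.div_lt_of_lt_mul (by rw [Nat.mul_comm]; exact hi)
    rw [min_eq_left (Nat.le_sub_one_of_lt hdiv)]
  · rw [List.map_map]
    symm
    apply List.eq_replicate_iff.mpr
    refine ⟨by simp, ?_⟩
    intro b hb
    simp only [List.mem_map, List.mem_range, Function.comp] at hb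
    obtain ⟨j, _, rfl⟩ := hb
    have hge : L.length ≤ (L.length * p + j) / p := (Nat.le_div_iff_mul_le (by omega)).mpr (by omega)
    rw [min_eq_right (by omega), List.getD_eq_getElem _ _ (by omega), List.getLast_eq_getElem]

theorem gen_by_col_py_spec : Claim_equal_gen_by_col_py := by
  intro n n_groups col_name _ hpre
  unfold Pre_gen_by_col_py at hpre
  unfold Spec_gen_by_col_py gen_by_col_py gen_by_col_py_alt
  simp only []
  set L := PySem.List.slice pvGroupLabels none (some n_groups) with hLdef
  set p := PySem.Int.floordiv n n_groups with hpdef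
  have hLtake : L = pvGroupLabels.take n_groups.toNat := PySem.List.slice_to _ (by omega)
  have hm1 : 1 ≤ L.length := by
    rw [hLtake, List.length_take]
    simp [pvGroupLabels]
    omega
  have hLne : L ≠ [] := by
    intro h; rw [h] at hm1; simp at hm1
  have hlast : PySem.List.pyGet? L (-1) = some (L.getLast hLne) := by
    rw [PySem.List.pyGet?_neg_one, List.getLast?_eq_getLast_of_ne_nil hLne]
  by_cases hp : p ≤ 0
  · -- fewer rows than groups (or n ≤ 0): A pads from empty, B replicates
    have hpt : p.toNat = 0 := by omega
    rw [if_pos hp]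
    simp only [hlast]
    have hcol : L.foldl (fun col label => col ++ List.replicate p.toNat label) [] = [] := by
      rw [PySem.List.foldl_append_eq_flatMap]
      simp [hpt]
    rw [hcol, pvPad_eq]
    have : (max n 0).toNat = (n - ([] : List String).length).toNat := by simp; omega
    rw [← this]
    simp
  · -- at least one full block per group: both are the position-indexed column
    rw [if_neg hp]
    simp only [hlast]
    have hng : 0 < n_groups := by omega
    have hp1 : (1 : Int) ≤ p := by omega
    have hpn : p = (p.toNat : Int) := by omega
    -- n_groups * p ≤ n, hence L.length * p ≤ n
    have hmul : p * n_groups ≤ n := by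
      have h1 := PySem.Int.floordiv_mul_add_mod n n_groups
      have h2 := PySem.Int.mod_nonneg n hng
      rw [← hpdef] at h1
      omega
    have hlen_le : (L.length : Int) ≤ n_groups := by
      rw [hLtake, List.length_take]
      have : pvGroupLabels.length = 5 := by simp [pvGroupLabels]
      omega
    have hLp_le : L.length * p.toNat ≤ n.toNat := by
      have h3 : (L.length : Int) * p ≤ n := by nlinarith
      have h4 : ((L.length * p.toNat : Nat) : Int) ≤ n := by push_cast; rw [← hpn]; exact h3
      omega
    -- A's side
    rw [PySem.List.foldl_append_eq_flatMap, List.nil_append, flatMap_replicate_eq, pvPad_eq]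
    have hlenA : ((List.range (L.length * p.toNat)).map (fun i => L.getD (i / p.toNat) "")).length
        = L.length * p.toNat := by simp
    rw [hlenA]
    have hsub : (n - (L.length * p.toNat : Nat)).toNat = n.toNat - L.length * p.toNat := by omega
    rw [hsub, pv_key L hLne p.toNat n.toNat (by omega) hLp_le]
    -- B's side
    rw [PySem.List.pyRange_one, List.map_map]
    simp only [Int.sub_zero]
    apply List.map_congr_left
    intro k hk
    rw [List.mem_range] at hk
    simp only [Function.comp]
    have hz : ((0 : Int) + (k : Int)) = (k : Int) := by omega
    rw [hz, hpn, PySem.Int.floordiv_natCast]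
    have hcast : ((L.length : Int) - 1) = ((L.length - 1 : Nat) : Int) := by omega
    rw [hcast, ← Nat.cast_min, PySem.List.pyGet?_natCast]
    have hlt : min (k / p.toNat) (L.length - 1) < L.length := by omega
    rw [List.getElem?_eq_getElem hlt]
    simp only [Option.getD_some, Int.toNat_natCast]
    exact List.getD_eq_getElem _ _ hlt
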